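-- pv_equiv track=rewrite | github.com/va64doman/codility | Challenges/chromium2017.py | zigZagEscape
-- ===== SOURCE A (Python) =====
-- def zigZagEscape(H):
--     MOD = 1000000007
--     N = len(H)
--     order = [0] * N
--     mask32 = (1 << 16) - 1
--     for i in range(N):
--         order[i] = (H[i] << 16) + i
--     order.sort()
--
--     for i in range(N):
--         H[order[i] & mask32] = N - i - 1
--
--     hs2p = 1
--     while N > hs2p:
--         hs2p <<= 1
--
--     m00 = [0] * (hs2p << 1)
--     m01 = [0] * (hs2p << 1)
--     m10 = [0] * (hs2p << 1)
--     m11 = [0] * (hs2p << 1)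
--     for i in range(hs2p, 2 * hs2p):
--         m00[i] = 1
--         m01[i] = 1
--         m10[i] = 0
--         m11[i] = 1
--
--     im = hs2p >> 1
--     while im > 0:
--         for i in range(im, im << 1):
--             L = 2 * i
--             R = L + 1
--             m00[i] = (m00[L] * m00[R] + m01[L] * m10[R]) % MOD
--             m01[i] = (m00[L] * m01[R] + m01[L] * m11[R]) % MOD
--             m10[i] = (m10[L] * m00[R] + m11[L] * m10[R]) % MOD
--             m11[i] = (m10[L] * m01[R] + m11[L] * m11[R]) % MOD
--         im >>= 1
--
--     nChoice = 1
--     for i in range(N):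
--         irang = hs2p + H[i] - 1
--         if H[i] > 0:
--             psind = irang
--             LL = m00[irang]
--             LR = m01[irang]
--             RL = m10[irang]
--             RR = m11[irang]
--             if psind & 1 == 1:
--                 tLL = LL
--                 tLR = LR
--                 tRL = RL
--                 tRR = RR
--                 L = psind ^ 1
--                 LL = (m00[L] * tLL + m01[L] * tRL) % MOD
--                 LR = (m00[L] * tLR + m01[L] * tRR) % MOD
--                 RL = (m10[L] * tLL + m11[L] * tRL) % MOD
--                 RR = (m10[L] * tLR + m11[L] * tRR) % MOD
--             psind >>= 1
--
--             while psind > 1: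
--                 if psind & 1 == 1:
--                     tLL = LL
--                     tLR = LR
--                     tRL = RL
--                     tRR = RR
--                     L = psind ^ 1
--                     LL = (m00[L] * tLL + m01[L] * tRL) % MOD
--                     LR = (m00[L] * tLR + m01[L] * tRR) % MOD
--                     RL = (m10[L] * tLL + m11[L] * tRL) % MOD
--                     RR = (m10[L] * tLR + m11[L] * tRR) % MOD
--                 psind >>= 1
--             nChoice = nChoice + LL + LR + RL + RR - 1
--             while nChoice >= MOD:
--                 nChoice -= MOD
--         m01[irang + 1] = 0
--         m10[irang + 1] = 1
--         psind = (irang + 1) >> 1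
--         while psind > 0:
--             L = psind << 1
--             R = L + 1
--             m00[psind] = (m00[L] * m00[R] + m01[L] * m10[R]) % MOD
--             m01[psind] = (m00[L] * m01[R] + m01[L] * m11[R]) % MOD
--             m10[psind] = (m10[L] * m00[R] + m11[L] * m10[R]) % MOD
--             m11[psind] = (m10[L] * m01[R] + m11[L] * m11[R]) % MOD
--             psind >>= 1
--     return nChoice
--     pass
-- ===== SOURCE B (Python) =====
-- MOD = 1000000007
--
-- def zigZagEscape(H):
--     # Same in-place rank compression as the original (H is mutated to the rank array).
--     N = len(H)
--     order = sorted((H[i] << 16) + i for i in range(N))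
--     for i in range(N):
--         H[order[i] & 0xFFFF] = N - i - 1
--     # Naive O(N^2) replacement for the segment tree: for each element take the
--     # left-to-right product (mod MOD) of the 2x2 leaf matrices over ranks below it.
--     seen = [False] * N
--     total = 1
--     for r in H:
--         if r > 0:
--             a, b, c, d = 1, 0, 0, 1
--             for k in range(r):
--                 if seen[k]:
--                     a, b, c, d = (a + b) % MOD, b, (c + d) % MOD, d
--                 else:
--                     a, b, c, d = a, (a + b) % MOD, c, (c + d) % MOD
--             total = total + a + b + c + d - 1
--             while total >= MOD:
--                 total -= MOD
--         seen[r] = True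
--     return total
-- ===== Notes on version B (the rewrite author's own statement) =====
-- stated objective: simpler
-- what changed: B keeps A's in-place rank compression verbatim but replaces the whole matrix segment tree (build, point updates and logarithmic prefix-query walks) by a direct left-to-right product of the same 2x2 leaf matrices over the ranks below each element, held in a plain boolean seen-list; Pre_ excludes lists longer than 2^16 elements, where A's 16-bit packing of list indices into the sort keys leaves positions >= 2^16 un-reranked, so A typically raises IndexError on its tree or returns values produced by accidental tree slots.
import Mathlib
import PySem

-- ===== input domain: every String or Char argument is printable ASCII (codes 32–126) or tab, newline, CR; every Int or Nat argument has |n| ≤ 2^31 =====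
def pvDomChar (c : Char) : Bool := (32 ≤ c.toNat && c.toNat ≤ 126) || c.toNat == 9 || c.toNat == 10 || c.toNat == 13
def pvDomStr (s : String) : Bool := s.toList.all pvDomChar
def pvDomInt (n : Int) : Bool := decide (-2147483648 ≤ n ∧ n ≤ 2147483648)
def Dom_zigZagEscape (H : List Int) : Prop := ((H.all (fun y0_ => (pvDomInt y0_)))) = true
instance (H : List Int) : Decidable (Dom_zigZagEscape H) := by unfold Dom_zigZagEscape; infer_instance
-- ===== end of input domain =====

-- B replaces A's matrix segment tree by a direct O(N^2) prefix product of the same 2x2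
-- leaf matrices (objective: simpler).  Both versions mutate the Python argument H in place
-- (identically); the equivalence proved here is about the RETURN value only.

def pvMOD : Int := 1000000007

-- ===== PORT A =====

-- while N > hs2p: hs2p <<= 1   (fuel N+1 suffices: hs2p doubles starting from 1)
def pvHsLoop : Nat → Nat → Nat → Nat
  | 0, _, p => p
  | fuel+1, n, p => if n > p then pvHsLoop fuel n (2*p) else p

-- the four arrays (m00, m01, m10, m11) of A's segment tree
def pvNode (s : List Int × List Int × List Int × List Int) (i : Nat) :
    Int × Int × Int × Int :=
  (s.1.getD i 0, s.2.1.getD i 0, s.2.2.1.getD i 0, s.2.2.2.getD i 0)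

-- the recombination A performs both while building and while updating (reads children 2i, 2i+1, writes i)
def pvCombAt (s : List Int × List Int × List Int × List Int) (i : Nat) :
    List Int × List Int × List Int × List Int :=
  let cL := pvNode s (2*i)
  let cR := pvNode s (2*i+1)
  (s.1.set i ((cL.1 * cR.1 + cL.2.1 * cR.2.2.1) % pvMOD),
   s.2.1.set i ((cL.1 * cR.2.1 + cL.2.1 * cR.2.2.2) % pvMOD),
   s.2.2.1.set i ((cL.2.2.1 * cR.1 + cL.2.2.2 * cR.2.2.1) % pvMOD),
   s.2.2.2.set i ((cL.2.2.1 * cR.2.1 + cL.2.2.2 * cR.2.2.2) % pvMOD))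

-- im = hs2p >> 1; while im > 0: for i in range(im, im << 1): combine; im >>= 1
def pvBuildLoop (s : List Int × List Int × List Int × List Int) (im : Nat) :
    List Int × List Int × List Int × List Int :=
  if im = 0 then s
  else pvBuildLoop ((List.range' im im).foldl pvCombAt s) (im / 2)
termination_by im
decreasing_by omega

-- the query accumulation step: multiply the left sibling L on the left of (LL,LR,RL,RR)
def pvCombL (s : List Int × List Int × List Int × List Int) (L : Nat)
    (acc : Int × Int × Int × Int) : Int × Int × Int × Int :=
  let n := pvNode s L
  ((n.1 * acc.1 + n.2.1 * acc.2.2.1) % pvMOD,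
   (n.1 * acc.2.1 + n.2.1 * acc.2.2.2) % pvMOD,
   (n.2.2.1 * acc.1 + n.2.2.2 * acc.2.2.1) % pvMOD,
   (n.2.2.1 * acc.2.1 + n.2.2.2 * acc.2.2.2) % pvMOD)

-- if psind & 1 == 1: combine with left sibling psind ^ 1  (for odd psind, psind ^ 1 = psind - 1, exact)
def pvQStep (s : List Int × List Int × List Int × List Int)
    (acc : Int × Int × Int × Int) (psind : Nat) : Int × Int × Int × Int :=
  if psind % 2 = 1 then pvCombL s (psind - 1) acc else acc

-- while psind > 1: ...; psind >>= 1
def pvQueryLoop (s : List Int × List Int × List Int × List Int)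
    (acc : Int × Int × Int × Int) (psind : Nat) : Int × Int × Int × Int :=
  if psind ≤ 1 then acc
  else pvQueryLoop s (pvQStep s acc psind) (psind / 2)
termination_by psind
decreasing_by omega

-- while nChoice >= MOD: nChoice -= MOD
def pvReduceA (x : Int) : Int :=
  if _h : x ≥ pvMOD then pvReduceA (x - pvMOD) else x
termination_by x.toNat
decreasing_by simp only [pvMOD] at _h ⊢; omega

-- psind = (irang+1) >> 1; while psind > 0: recombine; psind >>= 1
def pvUpdLoop (s : List Int × List Int × List Int × List Int) (psind : Nat) :
    List Int × List Int × List Int × List Int :=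
  if psind = 0 then s else pvUpdLoop (pvCombAt s psind) (psind / 2)
termination_by psind
decreasing_by omega

def zigZagEscape (H : List Int) : Int :=
  let N := H.length
  -- order[i] = (H[i] << 16) + i ; '<< 16' ported as * 65536 (exact for Python ints); then order.sort()
  let order := PySem.List.sorted ((List.range N).map (fun i => H.getD i 0 * 65536 + (i : Int))) (fun x => x) false
  -- H[order[i] & 0xFFFF] = N - i - 1 ; 'x & 0xFFFF' ported as floor-mod 65536 (exact; the result is in [0, 65536), so .toNat is exact)
  let H1 := (List.range N).foldl
    (fun acc i => acc.set (PySem.Int.mod (order.getD i 0) 65536).toNat ((N : Int) - (i : Int) - 1)) H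
  let hs2p := pvHsLoop (N+1) N 1
  let z : List Int := List.replicate (2*hs2p) 0
  -- for i in range(hs2p, 2*hs2p): m00[i]=1; m01[i]=1; m10[i]=0; m11[i]=1
  let s0 := (List.range' hs2p hs2p).foldl
    (fun (s : List Int × List Int × List Int × List Int) i =>
      (s.1.set i 1, s.2.1.set i 1, s.2.2.1.set i 0, s.2.2.2.set i 1)) (z, z, z, z)
  let s1 := pvBuildLoop s0 (hs2p / 2)
  -- main loop: for i in range(N)
  let fin := (List.range N).foldl
    (fun (st : (List Int × List Int × List Int × List Int) × Int) i =>
      let s := st.1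
      let r := H1.getD i 0
      -- irang = hs2p + H[i] - 1 as a Nat index (under Pre_, 0 ≤ H[i] < N ≤ hs2p, so this is exact)
      let irang : Nat := hs2p + r.toNat - 1
      let nCh' := if r > 0 then
          let acc0 := pvNode s irang
          let q := pvQueryLoop s (pvQStep s acc0 irang) (irang / 2)
          pvReduceA (st.2 + q.1 + q.2.1 + q.2.2.1 + q.2.2.2 - 1)
        else st.2
      -- m01[irang+1] = 0; m10[irang+1] = 1; then recombine up from (irang+1) >> 1
      let s' := (s.1, s.2.1.set (irang+1) 0, s.2.2.1.set (irang+1) 1, s.2.2.2)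
      (pvUpdLoop s' ((irang+1) / 2), nCh')) (s1, 1)
  fin.2

-- ===== PORT B =====

-- while total >= MOD: total -= MOD
def pvReduceB (x : Int) : Int :=
  if _h : x ≥ pvMOD then pvReduceB (x - pvMOD) else x
termination_by x.toNat
decreasing_by simp only [pvMOD] at _h ⊢; omega

def zigZagEscape_alt (H : List Int) : Int :=
  let N := H.length
  -- identical in-place rank compression (Source B keeps A's packing trick verbatim)
  let order := PySem.List.sorted ((List.range N).map (fun i => H.getD i 0 * 65536 + (i : Int))) (fun x => x) false
  let H1 := (List.range N).foldl
    (fun acc i => acc.set (PySem.Int.mod (order.getD i 0) 65536).toNat ((N : Int) - (i : Int) - 1)) H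
  -- for r in H: left-to-right product of the 2x2 leaf matrices over ranks k < r
  let fin := H1.foldl
    (fun (st : List Bool × Int) r =>
      let total' := if r > 0 then
          let m := (List.range r.toNat).foldl
            (fun (m : Int × Int × Int × Int) k =>
              if st.1.getD k false then
                ((m.1 + m.2.1) % pvMOD, m.2.1, (m.2.2.1 + m.2.2.2) % pvMOD, m.2.2.2)
              else
                (m.1, (m.1 + m.2.1) % pvMOD, m.2.2.1, (m.2.2.1 + m.2.2.2) % pvMOD))
            ((1 : Int), (0 : Int), (0 : Int), (1 : Int))
          pvReduceB (st.2 + m.1 + m.2.1 + m.2.2.1 + m.2.2.2 - 1)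
        else st.2
      (st.1.set r.toNat true, total')) (List.replicate N false, 1)
  fin.2

-- ===== PRECONDITION & SPEC =====
-- Pre_ excludes lists longer than 2^16 = 65536: A packs list indices into the low 16 bits of its
-- sort keys, so beyond that length positions ≥ 2^16 are never re-ranked and their stale heights
-- make A index its segment tree out of range (IndexError) or read/write accidental tree slots.
def Pre_zigZagEscape (H : List Int) : Prop := H.length ≤ 65536
instance (H : List Int) : Decidable (Pre_zigZagEscape H) := by unfold Pre_zigZagEscape; infer_instance
def pvWitness_zigZagEscape : List Int := [3, 1, 4, 1, 5]
def Spec_zigZagEscape (H : List Int) (out : Int) : Prop := out = zigZagEscape_alt H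
instance (H : List Int) (out : Int) : Decidable (Spec_zigZagEscape H out) := by unfold Spec_zigZagEscape; infer_instance

-- ===== CLAIM (what is proved, stated in full; the proofs are below) =====
def Claim_equal_zigZagEscape : Prop := ∀ (H : List Int), Dom_zigZagEscape H → Pre_zigZagEscape H → Spec_zigZagEscape H (zigZagEscape H)

-- ===== LEMMAS AND PROOFS =====

-- ---- modular 2x2 matrix algebra ----

def pvMatmul : (Int × Int × Int × Int) → (Int × Int × Int × Int) → (Int × Int × Int × Int)
  | (a,b,c,d), (e,f,g,h) => (a*e + b*g, a*f + b*h, c*e + d*g, c*f + d*h)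

def pvRed : (Int × Int × Int × Int) → (Int × Int × Int × Int)
  | (a,b,c,d) => (a % pvMOD, b % pvMOD, c % pvMOD, d % pvMOD)

theorem pvml (a e M : Int) : (a % M) * e % M = a * e % M := by
  rw [Int.mul_emod, Int.emod_emod_of_dvd _ dvd_rfl, ← Int.mul_emod]

theorem pvmr (a e M : Int) : a * (e % M) % M = a * e % M := by
  rw [Int.mul_emod, Int.emod_emod_of_dvd _ dvd_rfl, ← Int.mul_emod]

theorem pvdot_l (a b e g M : Int) : ((a % M) * e + (b % M) * g) % M = (a*e + b*g) % M := by
  rw [Int.add_emod, pvml, pvml, ← Int.add_emod]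

theorem pvdot_r (a b e g M : Int) : (a * (e % M) + b * (g % M)) % M = (a*e + b*g) % M := by
  rw [Int.add_emod, pvmr, pvmr, ← Int.add_emod]

theorem pvRed_matmul_left (x y : Int × Int × Int × Int) :
    pvRed (pvMatmul (pvRed x) y) = pvRed (pvMatmul x y) := by
  obtain ⟨a,b,c,d⟩ := x; obtain ⟨e,f,g,h⟩ := y
  simp [pvMatmul, pvRed, pvdot_l]

theorem pvRed_matmul_right (x y : Int × Int × Int × Int) :
    pvRed (pvMatmul x (pvRed y)) = pvRed (pvMatmul x y) := by
  obtain ⟨a,b,c,d⟩ := x; obtain ⟨e,f,g,h⟩ := y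
  simp [pvMatmul, pvRed, pvdot_r]

theorem pvMatmul_assoc (x y z : Int × Int × Int × Int) :
    pvMatmul (pvMatmul x y) z = pvMatmul x (pvMatmul y z) := by
  obtain ⟨a,b,c,d⟩ := x; obtain ⟨e,f,g,h⟩ := y; obtain ⟨i,j,k,l⟩ := z
  simp only [pvMatmul, Prod.mk.injEq]; refine ⟨by ring, by ring, by ring, by ring⟩

theorem pvMatmul_one_left (x : Int × Int × Int × Int) : pvMatmul (1,0,0,1) x = x := by
  obtain ⟨a,b,c,d⟩ := x; simp [pvMatmul]

theorem pvMatmul_one_right (x : Int × Int × Int × Int) : pvMatmul x (1,0,0,1) = x := by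
  obtain ⟨a,b,c,d⟩ := x; simp [pvMatmul]

-- ---- products of leaf matrices over an index range ----

def pvLeaf (seen : Nat → Bool) (j : Nat) : Int × Int × Int × Int :=
  if seen j then (1,0,1,1) else (1,1,0,1)

def pvProd (seen : Nat → Bool) (a n : Nat) : Int × Int × Int × Int :=
  (List.range' a n).foldl (fun acc j => pvMatmul acc (pvLeaf seen j)) (1,0,0,1)

theorem pvFoldl_matmul_init (f : Nat → Int × Int × Int × Int) (l : List Nat)
    (acc : Int × Int × Int × Int) :
    l.foldl (fun acc j => pvMatmul acc (f j)) acc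
      = pvMatmul acc (l.foldl (fun acc j => pvMatmul acc (f j)) (1,0,0,1)) := by
  induction l generalizing acc with
  | nil => simp [pvMatmul_one_right]
  | cons x t ih =>
    simp only [List.foldl_cons]
    rw [ih (pvMatmul acc (f x)), ih (pvMatmul (1,0,0,1) (f x)), pvMatmul_one_left,
      pvMatmul_assoc]

theorem pvProd_append (seen : Nat → Bool) (a m n : Nat) :
    pvProd seen a (m+n) = pvMatmul (pvProd seen a m) (pvProd seen (a+m) n) := by
  unfold pvProd
  rw [← List.range'_append_1, List.foldl_append, pvFoldl_matmul_init]

theorem pvProd_zero (seen : Nat → Bool) (a : Nat) : pvProd seen a 0 = (1,0,0,1) := rfl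

theorem pvProd_one (seen : Nat → Bool) (a : Nat) : pvProd seen a 1 = pvLeaf seen a := by
  unfold pvProd
  simp [List.range', pvMatmul_one_left]

theorem pvProd_congr (seen seen' : Nat → Bool) (a n : Nat)
    (h : ∀ j, a ≤ j → j < a + n → seen j = seen' j) :
    pvProd seen a n = pvProd seen' a n := by
  unfold pvProd
  induction n generalizing a with
  | zero => rfl
  | succ m ih =>
    rw [List.range'_succ, List.foldl_cons, List.foldl_cons]
    rw [pvFoldl_matmul_init, pvFoldl_matmul_init (fun j => pvLeaf seen' j)]
    have h1 : pvLeaf seen a = pvLeaf seen' a := by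
      unfold pvLeaf; rw [h a le_rfl (by omega)]
    rw [h1, ih (a+1) (fun j hj1 hj2 => h j (by omega) (by omega))]

-- ---- the segment-tree state and its invariant ----

def pvSized (K : Nat) (s : List Int × List Int × List Int × List Int) : Prop :=
  s.1.length = 2^(K+1) ∧ s.2.1.length = 2^(K+1) ∧ s.2.2.1.length = 2^(K+1) ∧ s.2.2.2.length = 2^(K+1)

-- first leaf position covered by node i (valid for 2^d ≤ i < 2^(d+1), d ≤ K)
def pvLo (K d i : Nat) : Nat := (i - 2^d) * 2^(K-d)

-- every valid node stores the reduced product of the leaf matrices it covers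
def pvGoodFrom (K dlo : Nat) (seen : Nat → Bool) (s : List Int × List Int × List Int × List Int) : Prop :=
  ∀ d i, dlo ≤ d → d ≤ K → 2^d ≤ i → i < 2^(d+1) →
    pvNode s i = pvRed (pvProd seen (pvLo K d i) (2^(K-d)))

theorem pvRed_leaf (seen : Nat → Bool) (j : Nat) : pvRed (pvLeaf seen j) = pvLeaf seen j := by
  unfold pvLeaf; split <;> decide

theorem pvNode_combAt_ne (s : List Int × List Int × List Int × List Int) (i j : Nat)
    (h : j ≠ i) : pvNode (pvCombAt s i) j = pvNode s j := by
  simp [pvCombAt, pvNode, List.getD, List.getElem?_set_ne (Ne.symm h)]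

theorem pvNode_combAt_self (s : List Int × List Int × List Int × List Int) (i : Nat)
    (h1 : i < s.1.length) (h2 : i < s.2.1.length) (h3 : i < s.2.2.1.length) (h4 : i < s.2.2.2.length) :
    pvNode (pvCombAt s i) i = pvRed (pvMatmul (pvNode s (2*i)) (pvNode s (2*i+1))) := by
  simp [pvCombAt, pvNode, pvRed, pvMatmul, List.getD, h1, h2, h3, h4]

theorem pvSized_combAt (K : Nat) (s : List Int × List Int × List Int × List Int) (i : Nat)
    (hS : pvSized K s) : pvSized K (pvCombAt s i) := by
  obtain ⟨hA, hB, hC, hD⟩ := hS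
  simp [pvCombAt, pvSized, List.length_set, hA, hB, hC, hD]

-- ---- index arithmetic ----

theorem pvpow_split (K d : Nat) (h : d < K) : 2^(K-d) = 2^(K-(d+1)) + 2^(K-(d+1)) := by
  have : K - d = (K - (d+1)) + 1 := by omega
  rw [this, pow_succ]; ring

theorem pvlo_left (K d i : Nat) (hd : d < K) (h1 : 2^d ≤ i) :
    pvLo K (d+1) (2*i) = pvLo K d i := by
  unfold pvLo
  have e1 : (2:Nat)^(d+1) = 2 * 2^d := by rw [pow_succ]; ring
  have e2 : (2:Nat)^(K-d) = 2 * 2^(K-(d+1)) := by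
    rw [← pow_succ']; congr 1; omega
  rw [e1, e2]
  have e3 : 2*i - 2*2^d = 2*(i - 2^d) := by omega
  rw [e3]; ring

theorem pvlo_right (K d i : Nat) (hd : d < K) (h1 : 2^d ≤ i) :
    pvLo K (d+1) (2*i+1) = pvLo K d i + 2^(K-(d+1)) := by
  unfold pvLo
  have e1 : (2:Nat)^(d+1) = 2 * 2^d := by rw [pow_succ]; ring
  have e2 : (2:Nat)^(K-d) = 2 * 2^(K-(d+1)) := by
    rw [← pow_succ']; congr 1; omega
  rw [e1, e2]
  have e3 : 2*i + 1 - 2*2^d = 2*(i - 2^d) + 1 := by omega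
  rw [e3]; ring

-- ---- the path from the root to leaf p: node at depth d ----

def pvPath (K p d : Nat) : Nat := (2^K + p) / 2^(K-d)

theorem pvPath_K (K p : Nat) : pvPath K p K = 2^K + p := by
  simp [pvPath]

theorem pvPath_div2 (K p d : Nat) (h : d < K) : pvPath K p (d+1) / 2 = pvPath K p d := by
  unfold pvPath
  rw [Nat.div_div_eq_div_mul]
  congr 1
  rw [← pow_succ]; congr 1; omega

theorem pvdiv_bracket (p c q : Nat) (hc : 0 < c) : p / c = q ↔ (q * c ≤ p ∧ p < q * c + c) := by
  constructor
  · rintro rfl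
    refine ⟨Nat.div_mul_le_self _ _, ?_⟩
    calc p = c * (p/c) + p % c := (Nat.div_add_mod p c).symm
      _ < c * (p/c) + c := Nat.add_lt_add_left (Nat.mod_lt p hc) _
      _ = p/c * c + c := by ring
  · rintro ⟨h1, h2⟩
    exact Nat.div_eq_of_lt_le h1 (by calc p < q*c + c := h2
                                      _ = (q+1)*c := by ring)

theorem pvPath_eq_add (K p d : Nat) (hd : d ≤ K) :
    pvPath K p d = 2^d + p / 2^(K-d) := by
  unfold pvPath
  have e : (2:Nat)^K = 2^d * 2^(K-d) := by rw [← pow_add]; congr 1; omega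
  rw [e, Nat.add_comm (2^d * 2^(K-d)) p, Nat.add_mul_div_right _ _ (Nat.two_pow_pos _), Nat.add_comm]

theorem pvPath_bounds (K p d : Nat) (hd : d ≤ K) (hp : p < 2^K) :
    2^d ≤ pvPath K p d ∧ pvPath K p d < 2^(d+1) := by
  rw [pvPath_eq_add K p d hd]
  constructor
  · exact Nat.le_add_right _ _
  · have e : (2:Nat)^K = 2^d * 2^(K-d) := by rw [← pow_add]; congr 1; omega
    have h1 : p / 2^(K-d) < 2^d := by
      rw [Nat.div_lt_iff_lt_mul (Nat.two_pow_pos _)]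
      calc p < 2^K := hp
        _ = 2^d * 2^(K-d) := e
    have e2 : (2:Nat)^(d+1) = 2 * 2^d := by rw [pow_succ]; ring
    omega

theorem pvPath_iff (K p d i : Nat) (hd : d ≤ K) (_hp : p < 2^K)
    (h1 : 2^d ≤ i) (_h2 : i < 2^(d+1)) :
    i = pvPath K p d ↔ (pvLo K d i ≤ p ∧ p < pvLo K d i + 2^(K-d)) := by
  rw [pvPath_eq_add K p d hd]
  unfold pvLo
  have hc : 0 < 2^(K-d) := Nat.two_pow_pos _
  rw [← pvdiv_bracket p (2^(K-d)) (i - 2^d) hc]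
  omega

-- ---- generic facts about the fold of pvCombAt over a level ----

theorem pvFold_comb_untouched (l : List Nat) (s : List Int × List Int × List Int × List Int)
    (j : Nat) (hj : j ∉ l) : pvNode (l.foldl pvCombAt s) j = pvNode s j := by
  induction l generalizing s with
  | nil => rfl
  | cons x t ih =>
    rw [List.foldl_cons, ih _ (by simp_all), pvNode_combAt_ne _ _ _ (by simp_all)]

theorem pvFold_comb_sized (K : Nat) (l : List Nat) (s : List Int × List Int × List Int × List Int)
    (hS : pvSized K s) : pvSized K (l.foldl pvCombAt s) := by
  induction l generalizing s with
  | nil => exact hS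
  | cons x t ih => exact ih _ (pvSized_combAt K s x hS)

theorem pvFold_comb_level (K d : Nat) (seen : Nat → Bool) (hdK : d < K) :
    ∀ (l : List Nat) (s : List Int × List Int × List Int × List Int), l.Nodup →
      (∀ x ∈ l, 2^d ≤ x ∧ x < 2^(d+1)) → pvSized K s → pvGoodFrom K (d+1) seen s →
      ∀ j ∈ l, pvNode (l.foldl pvCombAt s) j = pvRed (pvProd seen (pvLo K d j) (2^(K-d))) := by
  intro l
  induction l with
  | nil => intro s _ _ _ _ j hj; simp at hj
  | cons x t ih =>
    intro s hnd hmem hS hG j hj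
    obtain ⟨hx1, hx2⟩ := hmem x (by simp)
    have hxK : x < 2^(K+1) := by
      have : (2:Nat)^(d+1) ≤ 2^(K+1) := Nat.pow_le_pow_right (by norm_num) (by omega)
      omega
    have hG' : pvGoodFrom K (d+1) seen (pvCombAt s x) := by
      intro d' i hd1 hd2 hi1 hi2
      have hne : i ≠ x := by
        have : (2:Nat)^(d+1) ≤ 2^d' := Nat.pow_le_pow_right (by norm_num) hd1
        omega
      rw [pvNode_combAt_ne _ _ _ hne]
      exact hG d' i hd1 hd2 hi1 hi2
    have hS' : pvSized K (pvCombAt s x) := pvSized_combAt K s x hS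
    rw [List.foldl_cons]
    rcases List.mem_cons.mp hj with heq | hjt
    · -- j = x : untouched by the tail fold, fixed by pvCombAt
      subst heq
      have hxt : j ∉ t := (List.nodup_cons.mp hnd).1
      rw [pvFold_comb_untouched t _ j hxt]
      obtain ⟨hA, hB, hC, hD⟩ := hS
      rw [pvNode_combAt_self s j (by omega) (by omega) (by omega) (by omega)]
      -- children are valid nodes at depth d+1
      have hc1 : pvNode s (2*j) = pvRed (pvProd seen (pvLo K (d+1) (2*j)) (2^(K-(d+1)))) :=
        hG (d+1) (2*j) le_rfl (by omega) (by rw [pow_succ]; omega)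
          (by rw [pow_succ, pow_succ]; omega)
      have hc2 : pvNode s (2*j+1) = pvRed (pvProd seen (pvLo K (d+1) (2*j+1)) (2^(K-(d+1)))) :=
        hG (d+1) (2*j+1) le_rfl (by omega) (by rw [pow_succ]; omega)
          (by rw [pow_succ, pow_succ]; omega)
      rw [hc1, hc2, pvRed_matmul_left, pvRed_matmul_right,
        pvlo_left K d j hdK hx1, pvlo_right K d j hdK hx1,
        pvpow_split K d hdK, pvProd_append]
    · exact ih _ (List.nodup_cons.mp hnd).2 (fun y hy => hmem y (by simp [hy])) hS' hG' j hjt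

theorem pvBuild_correct (K : Nat) (seen : Nat → Bool) :
    ∀ (d : Nat) (s : List Int × List Int × List Int × List Int), d < K → pvSized K s →
      pvGoodFrom K (d+1) seen s →
      pvGoodFrom K 0 seen (pvBuildLoop s (2^d)) ∧ pvSized K (pvBuildLoop s (2^d)) := by
  intro d
  induction d with
  | zero =>
    intro s hdK hS hG
    have hr1 : List.range' 1 1 = [1] := rfl
    have h1 : (2:Nat)^0 = 1 := rfl
    rw [h1, pvBuildLoop, if_neg one_ne_zero]
    have h0 : (1:Nat)/2 = 0 := rfl
    rw [h0, pvBuildLoop, if_pos rfl]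
    have hlev := pvFold_comb_level K 0 seen hdK (List.range' 1 1) s (List.nodup_range')
      (fun x hx => by rw [hr1] at hx; simp at hx; subst hx; norm_num) hS hG
    refine ⟨?_, pvFold_comb_sized K _ s hS⟩
    intro d' i hd1 hd2 hi1 hi2
    rcases Nat.eq_zero_or_pos d' with rfl | hd'
    · have hi : i = 1 := by norm_num at hi1 hi2; omega
      subst hi
      exact hlev 1 (by rw [hr1]; simp)
    · have hne : i ∉ List.range' 1 1 := by
        rw [hr1]
        simp only [List.mem_singleton]
        have : (2:Nat) ≤ 2^d' := by
          calc (2:Nat) = 2^1 := rfl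
            _ ≤ 2^d' := Nat.pow_le_pow_right (by norm_num) hd'
        omega
      rw [pvFold_comb_untouched _ _ i hne]
      exact hG d' i (by omega) hd2 hi1 hi2
  | succ e ih =>
    intro s hdK hS hG
    rw [pvBuildLoop, if_neg (by positivity)]
    have h2 : 2^(e+1) / 2 = 2^e := by
      rw [pow_succ, Nat.mul_div_cancel _ (by norm_num)]
    rw [h2]
    set s2 := (List.range' (2^(e+1)) (2^(e+1))).foldl pvCombAt s with hs2
    have hS2 : pvSized K s2 := pvFold_comb_sized K _ s hS
    have hG2 : pvGoodFrom K (e+1) seen s2 := by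
      intro d' i hd1 hd2 hi1 hi2
      rcases Nat.lt_or_ge i (2^(e+2)) with hlt | hge
      · -- i is on the processed level e+1
        have hd' : d' = e+1 := by
          by_contra hne
          have h1 : e+2 ≤ d' := by omega
          have h2 : (2:Nat)^(e+2) ≤ 2^d' := Nat.pow_le_pow_right (by norm_num) h1
          omega
        subst hd'
        exact pvFold_comb_level K (e+1) seen hdK _ s (List.nodup_range')
          (by intro x hx; simp [List.mem_range'_1] at hx; rw [pow_succ]; omega) hS hG i
          (by simp [List.mem_range'_1]; rw [pow_succ] at hi2 ⊢; omega)
      · -- deeper node, untouched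
        rw [pvFold_comb_untouched _ _ i
          (by simp only [List.mem_range'_1]
              have h4 : (2:Nat)^(e+2) = 2^(e+1) + 2^(e+1) := by rw [pow_succ (2:Nat) (e+1)]; ring
              omega)]
        have hgt : e+1 < d' := by
          by_contra hne
          have hle : d'+1 ≤ e+2 := by omega
          have hpow : (2:Nat)^(d'+1) ≤ 2^(e+2) := Nat.pow_le_pow_right (by norm_num) hle
          omega
        exact hG d' i (by omega) hd2 hi1 hi2
    exact ih s2 (by omega) hS2 hG2

-- ---- correctness of the point update (leaf write + recombination up the path) ----

def pvSeenUpd (seen : Nat → Bool) (p : Nat) : Nat → Bool := fun k => if k = p then true else seen k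

theorem pvDepth_unique (a b i : Nat) (ha1 : 2^a ≤ i) (ha2 : i < 2^(a+1))
    (hb1 : 2^b ≤ i) (hb2 : i < 2^(b+1)) : a = b := by
  rcases Nat.lt_trichotomy a b with h | h | h
  · have : (2:Nat)^(a+1) ≤ 2^b := Nat.pow_le_pow_right (by norm_num) (by omega)
    omega
  · exact h
  · have : (2:Nat)^(b+1) ≤ 2^a := Nat.pow_le_pow_right (by norm_num) (by omega)
    omega

theorem pvCombAt_target (K : Nat) (seen : Nat → Bool) (s : List Int × List Int × List Int × List Int)
    (d v : Nat) (hdK : d < K) (hv1 : 2^d ≤ v) (hv2 : v < 2^(d+1)) (hS : pvSized K s)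
    (hcL : pvNode s (2*v) = pvRed (pvProd seen (pvLo K (d+1) (2*v)) (2^(K-(d+1)))))
    (hcR : pvNode s (2*v+1) = pvRed (pvProd seen (pvLo K (d+1) (2*v+1)) (2^(K-(d+1))))) :
    pvNode (pvCombAt s v) v = pvRed (pvProd seen (pvLo K d v) (2^(K-d))) := by
  obtain ⟨hA, hB, hC, hD⟩ := hS
  have hvK : v < 2^(K+1) := by
    have : (2:Nat)^(d+1) ≤ 2^(K+1) := Nat.pow_le_pow_right (by norm_num) (by omega)
    omega
  rw [pvNode_combAt_self s v (by omega) (by omega) (by omega) (by omega), hcL, hcR,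
    pvRed_matmul_left, pvRed_matmul_right, pvlo_left K d v hdK hv1, pvlo_right K d v hdK hv1,
    pvpow_split K d hdK, pvProd_append]

theorem pvUpd_go (K p : Nat) (hp : p < 2^K) (seen' : Nat → Bool) :
    ∀ (e : Nat) (s : List Int × List Int × List Int × List Int), e < K → pvSized K s →
      (∀ d' i, d' ≤ K → 2^d' ≤ i → i < 2^(d'+1) → (e < d' ∨ i ≠ pvPath K p d') →
        pvNode s i = pvRed (pvProd seen' (pvLo K d' i) (2^(K-d')))) →
      pvGoodFrom K 0 seen' (pvUpdLoop s (pvPath K p e)) ∧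
        pvSized K (pvUpdLoop s (pvPath K p e)) := by
  intro e
  induction e with
  | zero =>
    intro s heK hS hyp
    obtain ⟨hb1, hb2⟩ := pvPath_bounds K p 0 (by omega) hp
    have hv1 : pvPath K p 0 = 1 := by norm_num at hb1 hb2; omega
    rw [hv1, pvUpdLoop, if_neg one_ne_zero]
    have h0 : (1:Nat)/2 = 0 := rfl
    rw [h0, pvUpdLoop, if_pos rfl]
    refine ⟨?_, pvSized_combAt K s 1 hS⟩
    intro d' i hd1 hd2 hi1 hi2
    rcases Nat.eq_zero_or_pos d' with rfl | hd'
    · have hi : i = 1 := by norm_num at hi1 hi2; omega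
      subst hi
      have hone : (1:Nat) = 2^0 := rfl
      apply pvCombAt_target K seen' s 0 1 heK (by norm_num) (by norm_num) hS
      · have := hyp 1 (2*1) (by omega) (by norm_num) (by norm_num) (Or.inl (by omega))
        exact this
      · have := hyp 1 (2*1+1) (by omega) (by norm_num) (by norm_num) (Or.inl (by omega))
        exact this
    · have hne : i ≠ 1 := by
        have : (2:Nat) ≤ 2^d' := by
          calc (2:Nat) = 2^1 := rfl
            _ ≤ 2^d' := Nat.pow_le_pow_right (by norm_num) hd'
        omega
      rw [pvNode_combAt_ne _ _ _ hne]
      exact hyp d' i hd2 hi1 hi2 (Or.inl (by omega))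
  | succ e ih =>
    intro s heK hS hyp
    obtain ⟨hb1, hb2⟩ := pvPath_bounds K p (e+1) (by omega) hp
    have hvpos : pvPath K p (e+1) ≠ 0 := by
      have : (0:Nat) < 2^(e+1) := Nat.two_pow_pos _
      omega
    rw [pvUpdLoop, if_neg hvpos, pvPath_div2 K p e (by omega)]
    set v := pvPath K p (e+1) with hvdef
    apply ih (pvCombAt s v) (by omega) (pvSized_combAt K s v hS)
    intro d' i hdb hib1 hib2 hcond
    by_cases hiv : i = v
    · -- i is the just-recomputed path node at depth e+1
      have hde : d' = e+1 := pvDepth_unique d' (e+1) i hib1 hib2 (hiv ▸ hb1) (hiv ▸ hb2)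
      rw [hiv, hde]
      apply pvCombAt_target K seen' s (e+1) v (by omega) hb1 hb2 hS
      · exact hyp (e+2) (2*v) (by omega) (by rw [pow_succ]; omega)
          (by rw [pow_succ (2:Nat) (e+2), pow_succ (2:Nat) (e+1)] at *; omega) (Or.inl (by omega))
      · exact hyp (e+2) (2*v+1) (by omega) (by rw [pow_succ]; omega)
          (by rw [pow_succ (2:Nat) (e+2), pow_succ (2:Nat) (e+1)] at *; omega) (Or.inl (by omega))
    · rw [pvNode_combAt_ne _ _ _ hiv]
      apply hyp d' i hdb hib1 hib2
      rcases hcond with hlt | hne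
      · rcases Nat.eq_or_lt_of_le (Nat.succ_le_of_lt hlt) with heq | hgt
        · refine Or.inr ?_
          rw [← heq, ← hvdef]
          exact hiv
        · exact Or.inl (by omega)
      · exact Or.inr hne

theorem pvNode_setLeaf_ne (s : List Int × List Int × List Int × List Int) (q j : Nat)
    (h : j ≠ q) : pvNode (s.1, s.2.1.set q 0, s.2.2.1.set q 1, s.2.2.2) j = pvNode s j := by
  simp [pvNode, List.getD, List.getElem?_set_ne (Ne.symm h)]

theorem pvUpdate_correct (K : Nat) (seen : Nat → Bool)
    (s : List Int × List Int × List Int × List Int) (p : Nat) (hp : p < 2^K)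
    (hS : pvSized K s) (hG : pvGoodFrom K 0 seen s) :
    pvGoodFrom K 0 (pvSeenUpd seen p)
        (pvUpdLoop (s.1, s.2.1.set (2^K + p) 0, s.2.2.1.set (2^K + p) 1, s.2.2.2) ((2^K + p) / 2)) ∧
      pvSized K (pvUpdLoop (s.1, s.2.1.set (2^K + p) 0, s.2.2.1.set (2^K + p) 1, s.2.2.2) ((2^K + p) / 2)) := by
  obtain ⟨hA, hB, hC, hD⟩ := hS
  set q := 2^K + p with hqdef
  set s1 : List Int × List Int × List Int × List Int :=
    (s.1, s.2.1.set q 0, s.2.2.1.set q 1, s.2.2.2) with hs1def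
  have hS1 : pvSized K s1 := by
    simp [pvSized, hs1def, List.length_set, hA, hB, hC, hD]
  have hqlen : q < 2^(K+1) := by rw [pow_succ]; omega
  -- the old leaf q stored pvLeaf seen p, whose corners m00 and m11 are 1
  have hleaf_old : pvNode s q = pvLeaf seen p := by
    have := hG K q (Nat.zero_le _) le_rfl (by omega) (by rw [pow_succ]; omega)
    rw [this]
    have hlo : pvLo K K q = p := by unfold pvLo; simp [hqdef]
    rw [hlo]
    have hKK : K - K = 0 := by omega
    rw [hKK, pow_zero, pvProd_one, pvRed_leaf]
  have hleaf_new : pvNode s1 q = pvLeaf (pvSeenUpd seen p) p := by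
    have e1 : s1.1.getD q 0 = (pvLeaf seen p).1 := by
      have : (pvNode s q).1 = (pvLeaf seen p).1 := by rw [hleaf_old]
      simpa [pvNode] using this
    have e4 : s1.2.2.2.getD q 0 = (pvLeaf seen p).2.2.2 := by
      have : (pvNode s q).2.2.2 = (pvLeaf seen p).2.2.2 := by rw [hleaf_old]
      simpa [pvNode] using this
    have hm1 : (pvLeaf seen p).1 = 1 := by unfold pvLeaf; split <;> rfl
    have hm4 : (pvLeaf seen p).2.2.2 = 1 := by unfold pvLeaf; split <;> rfl
    have hset2 : s1.2.1.getD q 0 = 0 := by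
      simp [hs1def, List.getD, hB ▸ hqlen]
    have hset3 : s1.2.2.1.getD q 0 = 1 := by
      simp [hs1def, List.getD, hC ▸ hqlen]
    have : pvNode s1 q = (1, 0, 1, 1) := by
      unfold pvNode
      rw [hset2, hset3]
      rw [show s1.1 = s.1 from rfl, show s1.2.2.2 = s.2.2.2 from rfl] at *
      have := e1.trans hm1
      have := e4.trans hm4
      simp_all [pvNode]
    rw [this]
    unfold pvLeaf pvSeenUpd
    simp
  rcases Nat.eq_zero_or_pos K with rfl | hK
  · -- K = 0 : the tree is the single leaf, no recombination happens
    have hp0 : p = 0 := by norm_num at hp; omega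
    subst hp0
    have : q / 2 = 0 := by simp [hqdef]
    rw [this, pvUpdLoop, if_pos rfl]
    refine ⟨?_, hS1⟩
    intro d' i hd1 hd2 hi1 hi2
    have hd0 : d' = 0 := by omega
    subst hd0
    have hi : i = 1 := by norm_num at hi1 hi2; omega
    subst hi
    have hq1 : q = 1 := by simp [hqdef]
    rw [← hq1, hleaf_new]
    have hlo : pvLo 0 0 q = 0 := by unfold pvLo; simp [hqdef]
    rw [hlo]
    norm_num [pvProd_one, pvRed_leaf]
  · -- K ≥ 1 : climb the path from depth K-1
    have hKe : K - 1 < K := by omega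
    have hstep : q / 2 = pvPath K p (K-1) := by
      have h2 : K - 1 + 1 = K := by omega
      have hd := pvPath_div2 K p (K-1) (by omega)
      rw [h2, pvPath_K] at hd
      rw [hqdef]
      exact hd
    rw [hstep]
    apply pvUpd_go K p hp (pvSeenUpd seen p) (K-1) s1 hKe hS1
    intro d' i hd1 hi1 hi2 hcond
    rcases hcond with hlt | hne
    · -- d' = K : the leaf level
      have hdK : d' = K := by omega
      by_cases hiq : i = q
      · rw [hdK, hiq, hleaf_new]
        have hlo : pvLo K K q = p := by
          unfold pvLo
          rw [Nat.sub_self, pow_zero, Nat.mul_one]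
          omega
        rw [hlo, Nat.sub_self, pow_zero, pvProd_one, pvRed_leaf]
      · rw [hdK] at hi1 hi2 ⊢
        rw [pvNode_setLeaf_ne s q i hiq, hG K i (Nat.zero_le _) le_rfl hi1 hi2,
          Nat.sub_self, pow_zero, pvProd_one, pvProd_one]
        have hnep : pvLo K K i ≠ p := by
          unfold pvLo
          rw [Nat.sub_self, pow_zero, Nat.mul_one]
          omega
        unfold pvLeaf pvSeenUpd
        rw [if_neg hnep]
    · -- off the path: the covered leaf range misses p
      have hiq : i ≠ q := by
        have : (2:Nat)^(d'+1) ≤ 2^(K+1) := Nat.pow_le_pow_right (by norm_num) (by omega)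
        -- i < 2^(d'+1); if d' < K then i < 2^K ≤ q; if d' = K then i ≠ pvPath K p K = q
        rcases Nat.eq_or_lt_of_le hd1 with heq | hlt2
        · subst heq; rw [pvPath_K] at hne; exact hne
        · have : (2:Nat)^(d'+1) ≤ 2^K := Nat.pow_le_pow_right (by norm_num) (by omega)
          omega
      rw [pvNode_setLeaf_ne s q i hiq, hG d' i (Nat.zero_le _) hd1 hi1 hi2]
      have hoff := (not_iff_not.mpr (pvPath_iff K p d' i hd1 hp hi1 hi2)).mp hne
      push Not at hoff
      apply congrArg
      apply pvProd_congr
      intro j hj1 hj2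
      unfold pvSeenUpd
      have hjp : j ≠ p := by
        intro heq
        subst heq
        have := hoff hj1
        omega
      rw [if_neg hjp]

-- ---- correctness of the prefix query walk ----

theorem pvCombL_eq (s : List Int × List Int × List Int × List Int) (L : Nat)
    (acc : Int × Int × Int × Int) :
    pvCombL s L acc = pvRed (pvMatmul (pvNode s L) acc) := by
  obtain ⟨a1, a2, a3, a4⟩ := acc
  simp [pvCombL, pvNode, pvMatmul, pvRed]

theorem pvQStep_inv (K : Nat) (seen : Nat → Bool) (s : List Int × List Int × List Int × List Int)
    (hG : pvGoodFrom K 0 seen s) (d v r' : Nat) (hdK : d+1 ≤ K)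
    (hv1 : 2^(d+1) ≤ v) (hv2 : v < 2^(d+2))
    (hlo : pvLo K (d+1) v < r') (hhi : r' ≤ pvLo K (d+1) v + 2^(K-(d+1)))
    (acc : Int × Int × Int × Int)
    (hacc : acc = pvRed (pvProd seen (pvLo K (d+1) v) (r' - pvLo K (d+1) v))) :
    2^d ≤ v/2 ∧ v/2 < 2^(d+1) ∧ pvLo K d (v/2) < r' ∧ r' ≤ pvLo K d (v/2) + 2^(K-d) ∧
      pvQStep s acc v = pvRed (pvProd seen (pvLo K d (v/2)) (r' - pvLo K d (v/2))) := by
  have hd : d < K := by omega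
  have hps := pvpow_split K d hd
  have hp1 : (2:Nat)^(d+1) = 2*2^d := by rw [pow_succ]; ring
  have hp2 : (2:Nat)^(d+2) = 2*2^(d+1) := by rw [pow_succ]; ring
  set w := v / 2 with hw
  have hwb1 : 2^d ≤ w := by omega
  have hwb2 : w < 2^(d+1) := by omega
  by_cases hpar : v % 2 = 1
  · -- v odd : combine with the left sibling v-1 = 2*w
    have hv : v = 2*w + 1 := by omega
    have hsw : pvLo K (d+1) (2*w) = pvLo K d w := pvlo_left K d w hd hwb1
    have hsv : pvLo K (d+1) v = pvLo K d w + 2^(K-(d+1)) := by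
      rw [hv]; exact pvlo_right K d w hd hwb1
    refine ⟨hwb1, hwb2, by omega, by omega, ?_⟩
    unfold pvQStep
    rw [if_pos hpar]
    have hvm1 : v - 1 = 2*w := by omega
    rw [hvm1, pvCombL_eq]
    have hnode : pvNode s (2*w) = pvRed (pvProd seen (pvLo K (d+1) (2*w)) (2^(K-(d+1)))) :=
      hG (d+1) (2*w) (Nat.zero_le _) hdK (by omega) (by omega)
    rw [hnode, hacc, pvRed_matmul_left, pvRed_matmul_right, hsw, hsv,
      ← pvProd_append seen (pvLo K d w) (2^(K-(d+1))) (r' - (pvLo K d w + 2^(K-(d+1))))]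
    congr 2
    omega
  · -- v even : nothing to combine, the parent covers the same left edge
    have hv : v = 2*w := by omega
    have hsw : pvLo K (d+1) v = pvLo K d w := by
      rw [hv]; exact pvlo_left K d w hd hwb1
    refine ⟨hwb1, hwb2, by omega, by omega, ?_⟩
    unfold pvQStep
    rw [if_neg hpar, hacc, hsw]

theorem pvQueryLoop_correct (K : Nat) (seen : Nat → Bool)
    (s : List Int × List Int × List Int × List Int) (hG : pvGoodFrom K 0 seen s) (r' : Nat) :
    ∀ (d : Nat) (v : Nat) (acc : Int × Int × Int × Int), d ≤ K → 2^d ≤ v → v < 2^(d+1) →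
      pvLo K d v < r' → r' ≤ pvLo K d v + 2^(K-d) →
      acc = pvRed (pvProd seen (pvLo K d v) (r' - pvLo K d v)) →
      pvQueryLoop s acc v = pvRed (pvProd seen 0 r') := by
  intro d
  induction d with
  | zero =>
    intro v acc hdK h1 h2 hlo hhi hacc
    have hv : v = 1 := by norm_num at h1 h2; omega
    subst hv
    rw [pvQueryLoop, if_pos (by norm_num)]
    have hlo0 : pvLo K 0 1 = 0 := by unfold pvLo; simp
    rw [hacc, hlo0, Nat.sub_zero]
  | succ d ih =>
    intro v acc hdK h1 h2 hlo hhi hacc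
    have h2pos : 2 ≤ v := by
      have : (2:Nat) ≤ 2^(d+1) := by
        calc (2:Nat) = 2^1 := rfl
          _ ≤ 2^(d+1) := Nat.pow_le_pow_right (by norm_num) (by omega)
      omega
    rw [pvQueryLoop, if_neg (by omega)]
    obtain ⟨b1, b2, b3, b4, b5⟩ := pvQStep_inv K seen s hG d v r' hdK h1 h2 hlo hhi acc hacc
    exact ih (v/2) _ (by omega) b1 b2 b3 b4 b5

theorem pvQuery_correct (M : Nat) (seen : Nat → Bool)
    (s : List Int × List Int × List Int × List Int) (hG : pvGoodFrom (M+1) 0 seen s)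
    (rn : Nat) (h1 : 1 ≤ rn) (h2 : rn ≤ 2^(M+1)) :
    pvQueryLoop s (pvQStep s (pvNode s (2^(M+1) + rn - 1)) (2^(M+1) + rn - 1)) ((2^(M+1) + rn - 1)/2)
      = pvRed (pvProd seen 0 rn) := by
  set v := 2^(M+1) + rn - 1 with hv
  have hpow : (0:Nat) < 2^(M+1) := Nat.two_pow_pos _
  have hvb1 : 2^(M+1) ≤ v := by omega
  have hvb2 : v < 2^(M+1+1) := by rw [pow_succ]; omega
  have hloK : pvLo (M+1) (M+1) v = rn - 1 := by
    unfold pvLo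
    rw [Nat.sub_self, pow_zero, Nat.mul_one]
    omega
  have hacc : pvNode s v = pvRed (pvProd seen (pvLo (M+1) (M+1) v) (rn - pvLo (M+1) (M+1) v)) := by
    have := hG (M+1) v (Nat.zero_le _) le_rfl hvb1 hvb2
    rw [this, Nat.sub_self, pow_zero, hloK]
    congr 2
    omega
  obtain ⟨b1, b2, b3, b4, b5⟩ := pvQStep_inv (M+1) seen s hG M v rn le_rfl hvb1 hvb2
    (by rw [hloK]; omega) (by rw [hloK, Nat.sub_self, pow_zero]; omega) _ hacc
  exact pvQueryLoop_correct (M+1) seen s hG rn M (v/2) _ (by omega) b1 b2 b3 b4 b5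

-- ---- basic getD/set helpers ----

theorem pvGetD_set_self {α : Type} (l : List α) (i : Nat) (v d : α) (h : i < l.length) :
    (l.set i v).getD i d = v := by
  simp [List.getD, h]

theorem pvGetD_set_ne {α : Type} (l : List α) (i j : Nat) (v d : α) (h : i ≠ j) :
    (l.set i v).getD j d = l.getD j d := by
  simp [List.getD, List.getElem?_set_ne h]

-- ---- B's inner fold computes the same reduced prefix product ----

theorem pvBInner (seen : List Bool) (n : Nat) :
    (List.range n).foldl
      (fun (m : Int × Int × Int × Int) k =>
        if seen.getD k false then
          ((m.1 + m.2.1) % pvMOD, m.2.1, (m.2.2.1 + m.2.2.2) % pvMOD, m.2.2.2)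
        else
          (m.1, (m.1 + m.2.1) % pvMOD, m.2.2.1, (m.2.2.1 + m.2.2.2) % pvMOD))
      ((1 : Int), (0 : Int), (0 : Int), (1 : Int))
    = pvRed (pvProd (fun k => seen.getD k false) 0 n) := by
  have hmm : ∀ z : Int, z % pvMOD % pvMOD = z % pvMOD := fun z => Int.emod_emod_of_dvd z dvd_rfl
  induction n with
  | zero =>
    rw [pvProd_zero]
    show ((1:Int), (0:Int), (0:Int), (1:Int)) = pvRed (1, 0, 0, 1)
    decide
  | succ n ih =>
    rw [List.range_succ, List.foldl_append, List.foldl_cons, List.foldl_nil, ih]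
    have hsplit : pvProd (fun k => seen.getD k false) 0 (n+1)
        = pvMatmul (pvProd (fun k => seen.getD k false) 0 n)
            (pvLeaf (fun k => seen.getD k false) n) := by
      rw [pvProd_append _ 0 n 1, pvProd_one, Nat.zero_add]
    rw [hsplit, ← pvRed_matmul_left]
    obtain ⟨x1, x2, x3, x4⟩ := pvProd (fun k => seen.getD k false) 0 n
    cases hs : seen.getD n false with
    | false =>
      rw [List.getD] at hs
      simp [pvLeaf, List.getD, hs, pvMatmul, pvRed]
    | true =>
      rw [List.getD] at hs
      simp [pvLeaf, List.getD, hs, pvMatmul, pvRed, hmm]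

-- ---- the two (textually identical) normalisation loops agree ----

theorem pvReduceAB : ∀ x : Int, pvReduceA x = pvReduceB x := by
  intro x
  induction x using pvReduceA.induct with
  | case1 x h ih => rw [pvReduceA, pvReduceB, dif_pos h, dif_pos h, ih]
  | case2 x h => rw [pvReduceA, pvReduceB, dif_neg h, dif_neg h]

-- ---- a fold over range reading a list is a fold over the list ----

theorem pvFoldl_getD_range {α β : Type} (l : List α) (dflt : α) (F : β → α → β) (init : β) :
    (List.range l.length).foldl (fun b i => F b (l.getD i dflt)) init = l.foldl F init := by
  induction l generalizing init with
  | nil => rfl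
  | cons x t ih =>
    rw [List.length_cons, List.range_succ_eq_map, List.foldl_cons, List.foldl_map]
    simp only [List.getD_cons_zero, List.getD_cons_succ]
    rw [List.foldl_cons]
    exact ih (F init x)

theorem pvFoldl_getD_range' {α β : Type} (l : List α) (n : Nat) (hn : n = l.length)
    (dflt : α) (F : β → α → β) (init : β) :
    (List.range n).foldl (fun b i => F b (l.getD i dflt)) init = l.foldl F init := by
  subst hn
  exact pvFoldl_getD_range l dflt F init

-- ---- folds that only set entries ----

theorem pvFoldl_set_length {α : Type} (l : List Nat) (f : Nat → Nat) (g : Nat → α)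
    (L0 : List α) :
    (l.foldl (fun acc i => acc.set (f i) (g i)) L0).length = L0.length := by
  induction l generalizing L0 with
  | nil => rfl
  | cons x t ih => rw [List.foldl_cons, ih, List.length_set]

theorem pvFoldl_set_getD {α : Type} (f : Nat → Nat) (g : Nat → α) (d : α) :
    ∀ (n : Nat) (L0 : List α) (k : Nat), (∃ i, i < n ∧ f i = k) → k < L0.length →
      ∃ i, i < n ∧
        ((List.range n).foldl (fun acc i => acc.set (f i) (g i)) L0).getD k d = g i := by
  intro n
  induction n with
  | zero =>
    rintro L0 k ⟨i, hi, _⟩ _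
    omega
  | succ m ih =>
    rintro L0 k ⟨i, hi, hf⟩ hk
    rw [List.range_succ, List.foldl_append, List.foldl_cons, List.foldl_nil]
    by_cases hkm : f m = k
    · refine ⟨m, by omega, ?_⟩
      have hlen : k < ((List.range m).foldl (fun acc i => acc.set (f i) (g i)) L0).length := by
        rw [pvFoldl_set_length]; exact hk
      rw [← hkm, pvGetD_set_self _ _ _ _ (hkm ▸ hlen)]
    · have him : i ≠ m := fun he => hkm (he ▸ hf)
      obtain ⟨i', hi', hv⟩ := ih L0 k ⟨i, by omega, hf⟩ hk
      exact ⟨i', by omega, by rw [pvGetD_set_ne _ _ _ _ _ hkm, hv]⟩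

-- ---- the power-of-two loop ----

theorem pvHsLoop_pow : ∀ (fuel N p : Nat), N ≤ 2^fuel * p →
    ∃ j, pvHsLoop fuel N p = 2^j * p ∧ N ≤ 2^j * p := by
  intro fuel
  induction fuel with
  | zero =>
    intro N p h
    exact ⟨0, by simp [pvHsLoop], by simpa using h⟩
  | succ f ih =>
    intro N p h
    rw [pvHsLoop]
    by_cases hc : N > p
    · rw [if_pos hc]
      obtain ⟨j, hj1, hj2⟩ := ih N (2*p)
        (by calc N ≤ 2^(f+1) * p := h
              _ = 2^f * (2*p) := by rw [pow_succ]; ring)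
      refine ⟨j+1, ?_, ?_⟩
      · rw [hj1, pow_succ]; ring
      · calc N ≤ 2^j * (2*p) := hj2
          _ = 2^(j+1) * p := by rw [pow_succ]; ring
    · rw [if_neg hc]
      exact ⟨0, by norm_num, by omega⟩

def pvHs (N : Nat) : Nat := pvHsLoop (N+1) N 1

theorem pvHs_spec (N : Nat) : ∃ K, pvHs N = 2^K ∧ N ≤ 2^K := by
  obtain ⟨j, h1, h2⟩ := pvHsLoop_pow (N+1) N 1
    (by
      have := Nat.lt_two_pow_self (n := N)
      calc N ≤ 2^N := by omega
        _ ≤ 2^(N+1) := Nat.pow_le_pow_right (by norm_num) (by omega)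
        _ = 2^(N+1) * 1 := by ring)
  exact ⟨j, by rw [pvHs, h1, Nat.mul_one], by omega⟩

-- ---- the initial tree ----

def pvS0 (hs2p : Nat) : List Int × List Int × List Int × List Int :=
  (List.range' hs2p hs2p).foldl
    (fun (s : List Int × List Int × List Int × List Int) i =>
      (s.1.set i 1, s.2.1.set i 1, s.2.2.1.set i 0, s.2.2.2.set i 1))
    (List.replicate (2*hs2p) (0:Int), List.replicate (2*hs2p) (0:Int),
     List.replicate (2*hs2p) (0:Int), List.replicate (2*hs2p) (0:Int))

def pvTree0 (hs2p : Nat) : List Int × List Int × List Int × List Int :=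
  pvBuildLoop (pvS0 hs2p) (hs2p / 2)

theorem pvInit_fold (L : Nat) :
    ∀ (cnt a : Nat) (s : List Int × List Int × List Int × List Int),
      s.1.length = L → s.2.1.length = L → s.2.2.1.length = L → s.2.2.2.length = L →
      a + cnt ≤ L →
      (∀ j, pvNode ((List.range' a cnt).foldl
          (fun (s : List Int × List Int × List Int × List Int) i =>
            (s.1.set i 1, s.2.1.set i 1, s.2.2.1.set i 0, s.2.2.2.set i 1)) s) j
        = if a ≤ j ∧ j < a + cnt then (1,1,0,1) else pvNode s j) ∧
      ((List.range' a cnt).foldl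
          (fun (s : List Int × List Int × List Int × List Int) i =>
            (s.1.set i 1, s.2.1.set i 1, s.2.2.1.set i 0, s.2.2.2.set i 1)) s).1.length = L := by
  intro cnt
  induction cnt with
  | zero =>
    intro a s h1 h2 h3 h4 hle
    refine ⟨fun j => ?_, h1⟩
    rw [if_neg (by omega)]
    rfl
  | succ m ih =>
    intro a s h1 h2 h3 h4 hle
    rw [List.range'_succ, List.foldl_cons]
    obtain ⟨hnode, hlen⟩ := ih (a+1)
      (s.1.set a 1, s.2.1.set a 1, s.2.2.1.set a 0, s.2.2.2.set a 1)
      (by simp [List.length_set, h1]) (by simp [List.length_set, h2])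
      (by simp [List.length_set, h3]) (by simp [List.length_set, h4]) (by omega)
    refine ⟨fun j => ?_, hlen⟩
    rw [hnode j]
    by_cases hj1 : a+1 ≤ j ∧ j < a+1+m
    · rw [if_pos hj1, if_pos (by omega)]
    · rw [if_neg hj1]
      by_cases hja : j = a
      · subst hja
        rw [if_pos (by omega)]
        unfold pvNode
        rw [pvGetD_set_self _ _ _ _ (by omega), pvGetD_set_self _ _ _ _ (by omega),
          pvGetD_set_self _ _ _ _ (by omega), pvGetD_set_self _ _ _ _ (by omega)]
      · rw [if_neg (by omega)]
        unfold pvNode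
        rw [pvGetD_set_ne _ _ _ _ _ (Ne.symm hja), pvGetD_set_ne _ _ _ _ _ (Ne.symm hja),
          pvGetD_set_ne _ _ _ _ _ (Ne.symm hja), pvGetD_set_ne _ _ _ _ _ (Ne.symm hja)]

theorem pvS0_lengths : ∀ (l : List Nat) (s : List Int × List Int × List Int × List Int),
    ((l.foldl (fun (s : List Int × List Int × List Int × List Int) i =>
        (s.1.set i 1, s.2.1.set i 1, s.2.2.1.set i 0, s.2.2.2.set i 1)) s).1.length = s.1.length ∧
      (l.foldl (fun (s : List Int × List Int × List Int × List Int) i =>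
        (s.1.set i 1, s.2.1.set i 1, s.2.2.1.set i 0, s.2.2.2.set i 1)) s).2.1.length = s.2.1.length ∧
      (l.foldl (fun (s : List Int × List Int × List Int × List Int) i =>
        (s.1.set i 1, s.2.1.set i 1, s.2.2.1.set i 0, s.2.2.2.set i 1)) s).2.2.1.length = s.2.2.1.length ∧
      (l.foldl (fun (s : List Int × List Int × List Int × List Int) i =>
        (s.1.set i 1, s.2.1.set i 1, s.2.2.1.set i 0, s.2.2.2.set i 1)) s).2.2.2.length = s.2.2.2.length) := by
  intro l
  induction l with
  | nil => exact fun s => ⟨rfl, rfl, rfl, rfl⟩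
  | cons x t ih =>
    intro s
    obtain ⟨e1, e2, e3, e4⟩ := ih (s.1.set x 1, s.2.1.set x 1, s.2.2.1.set x 0, s.2.2.2.set x 1)
    rw [List.foldl_cons]
    refine ⟨?_, ?_, ?_, ?_⟩ <;> simp [e1, e2, e3, e4, List.length_set]

theorem pvTree0_correct (K : Nat) :
    pvGoodFrom K 0 (fun _ => false) (pvTree0 (2^K)) ∧ pvSized K (pvTree0 (2^K)) := by
  have hlen : 2 * 2^K = 2^(K+1) := by rw [pow_succ]; ring
  have hrep : (List.replicate (2*2^K) (0:Int)).length = 2^(K+1) := by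
    rw [List.length_replicate, hlen]
  obtain ⟨hnode, _⟩ := pvInit_fold (2^(K+1)) (2^K) (2^K)
    (List.replicate (2*2^K) (0:Int), List.replicate (2*2^K) (0:Int),
     List.replicate (2*2^K) (0:Int), List.replicate (2*2^K) (0:Int))
    hrep hrep hrep hrep (by rw [pow_succ]; omega)
  have hS0 : pvSized K (pvS0 (2^K)) := by
    obtain ⟨e1, e2, e3, e4⟩ := pvS0_lengths (List.range' (2^K) (2^K))
      (List.replicate (2*2^K) (0:Int), List.replicate (2*2^K) (0:Int),
       List.replicate (2*2^K) (0:Int), List.replicate (2*2^K) (0:Int))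
    exact ⟨by rw [pvS0, e1]; exact hrep, by rw [pvS0, e2]; exact hrep,
      by rw [pvS0, e3]; exact hrep, by rw [pvS0, e4]; exact hrep⟩
  have hGK : pvGoodFrom K K (fun _ => false) (pvS0 (2^K)) := by
    intro d i hd1 hd2 hi1 hi2
    have hdK : d = K := by omega
    subst hdK
    have hi2' : i < 2^d + 2^d := by rw [pow_succ] at hi2; omega
    rw [pvS0, hnode i, if_pos ⟨hi1, hi2'⟩, Nat.sub_self, pow_zero, pvProd_one]
    unfold pvLeaf
    rw [if_neg (by simp)]
    decide
  rcases Nat.eq_zero_or_pos K with rfl | hK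
  · -- K = 0 : no build pass
    have h0 : (2:Nat)^0 / 2 = 0 := rfl
    unfold pvTree0
    rw [h0, pvBuildLoop, if_pos rfl]
    refine ⟨?_, hS0⟩
    intro d i hd1 hd2 hi1 hi2
    exact hGK d i (by omega) hd2 hi1 hi2
  · have hKdiv : (2:Nat)^K / 2 = 2^(K-1) := by
      have h2 : (2:Nat)^K = 2^(K-1)*2 := by rw [← pow_succ]; congr 1; omega
      rw [h2, Nat.mul_div_cancel _ (by norm_num)]
    unfold pvTree0
    rw [hKdiv]
    apply pvBuild_correct K (fun _ => false) (K-1) (pvS0 (2^K)) (by omega) hS0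
    rw [show K - 1 + 1 = K from by omega]
    exact hGK

-- ---- the shared rank compression ----

def pvRankT (H : List Int) : List Int :=
  (List.range H.length).foldl
    (fun acc i => acc.set
      (PySem.Int.mod ((PySem.List.sorted ((List.range H.length).map
          (fun j => H.getD j 0 * 65536 + (j : Int))) (fun x => x) false).getD i 0) 65536).toNat
      ((H.length : Int) - (i : Int) - 1)) H

theorem pvRankT_length (H : List Int) : (pvRankT H).length = H.length := by
  unfold pvRankT
  exact pvFoldl_set_length _ _ _ _

theorem pvRankT_bounds (H : List Int) (hlen : H.length ≤ 65536) :
    ∀ k, k < H.length → 0 ≤ (pvRankT H).getD k 0 ∧ (pvRankT H).getD k 0 < (H.length : Int) := by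
  intro k hk
  have hmem : (H.getD k 0 * 65536 + (k:Int)) ∈ (List.range H.length).map
      (fun j => H.getD j 0 * 65536 + (j : Int)) :=
    List.mem_map.mpr ⟨k, List.mem_range.mpr hk, rfl⟩
  have hmem2 : (H.getD k 0 * 65536 + (k:Int)) ∈ PySem.List.sorted ((List.range H.length).map
      (fun j => H.getD j 0 * 65536 + (j : Int))) (fun x => x) false :=
    (PySem.List.mem_sorted _ _ _ _).mpr hmem
  obtain ⟨i, hi, hgeti⟩ := List.mem_iff_getElem.mp hmem2
  have hilen : i < H.length := by
    have := hi
    rwa [PySem.List.length_sorted, List.length_map, List.length_range] at this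
  have hgetD : (PySem.List.sorted ((List.range H.length).map
      (fun j => H.getD j 0 * 65536 + (j : Int))) (fun x => x) false).getD i 0
      = H.getD k 0 * 65536 + (k:Int) := by
    rw [List.getD, List.getElem?_eq_getElem hi]
    simpa using hgeti
  have hmask : (PySem.Int.mod ((PySem.List.sorted ((List.range H.length).map
      (fun j => H.getD j 0 * 65536 + (j : Int))) (fun x => x) false).getD i 0) 65536).toNat = k := by
    rw [hgetD, PySem.Int.mod_eq_emod_of_pos (by norm_num)]
    have hstep : (H.getD k 0 * 65536 + (k:Int)) % 65536 = (k:Int) % 65536 := by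
      rw [add_comm, Int.add_mul_emod_self_right]
    rw [hstep, Int.emod_eq_of_lt (by positivity) (by exact_mod_cast by omega : (k:Int) < 65536)]
    exact Int.toNat_natCast k
  obtain ⟨iw, hiw, hval⟩ := pvFoldl_set_getD
    (fun i => (PySem.Int.mod ((PySem.List.sorted ((List.range H.length).map
        (fun j => H.getD j 0 * 65536 + (j : Int))) (fun x => x) false).getD i 0) 65536).toNat)
    (fun i => (H.length : Int) - (i : Int) - 1) 0 H.length H k ⟨i, hilen, hmask⟩ hk
  unfold pvRankT
  rw [hval]
  constructor <;> omega

-- ---- the two ports as value-level folds ----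

def pvAStepV (hs2p : Nat) (st : (List Int × List Int × List Int × List Int) × Int) (r : Int) :
    (List Int × List Int × List Int × List Int) × Int :=
  let s := st.1
  let irang : Nat := hs2p + r.toNat - 1
  let nCh' := if r > 0 then
      let acc0 := pvNode s irang
      let q := pvQueryLoop s (pvQStep s acc0 irang) (irang / 2)
      pvReduceA (st.2 + q.1 + q.2.1 + q.2.2.1 + q.2.2.2 - 1)
    else st.2
  (pvUpdLoop (s.1, s.2.1.set (irang+1) 0, s.2.2.1.set (irang+1) 1, s.2.2.2) ((irang+1) / 2), nCh')

def pvBStepV (st : List Bool × Int) (r : Int) : List Bool × Int :=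
  let total' := if r > 0 then
      let m := (List.range r.toNat).foldl
        (fun (m : Int × Int × Int × Int) k =>
          if st.1.getD k false then
            ((m.1 + m.2.1) % pvMOD, m.2.1, (m.2.2.1 + m.2.2.2) % pvMOD, m.2.2.2)
          else
            (m.1, (m.1 + m.2.1) % pvMOD, m.2.2.1, (m.2.2.1 + m.2.2.2) % pvMOD))
        ((1 : Int), (0 : Int), (0 : Int), (1 : Int))
      pvReduceB (st.2 + m.1 + m.2.1 + m.2.2.1 + m.2.2.2 - 1)
    else st.2
  (st.1.set r.toNat true, total')

theorem zigZagEscape_eq (H : List Int) :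
    zigZagEscape H = ((List.range H.length).foldl
      (fun st i => pvAStepV (pvHs H.length) st ((pvRankT H).getD i 0))
      (pvTree0 (pvHs H.length), 1)).2 := rfl

theorem zigZagEscape_alt_eq (H : List Int) :
    zigZagEscape_alt H = ((pvRankT H).foldl pvBStepV (List.replicate H.length false, 1)).2 := rfl

-- ---- seen-list bridges ----

theorem pvSeen_set (seen : List Bool) (p : Nat) (hp : p < seen.length) :
    (fun k => (seen.set p true).getD k false) = pvSeenUpd (fun k => seen.getD k false) p := by
  funext k
  unfold pvSeenUpd
  by_cases h : k = p
  · subst h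
    rw [if_pos rfl, pvGetD_set_self _ _ _ _ hp]
  · rw [if_neg h, pvGetD_set_ne _ _ _ _ _ (fun he => h he.symm)]

theorem pvReplicate_false (N : Nat) :
    (fun k => (List.replicate N false).getD k false) = (fun _ => false) := by
  funext k
  by_cases h : k < N <;> simp [List.getD, h]

-- ---- the main loop: the segment tree and the naive scan produce the same totals ----

theorem pvMain_fold (K N : Nat) (hNK : N ≤ 2^K) :
    ∀ (l : List Int) (sA : List Int × List Int × List Int × List Int)
      (seen : List Bool) (tot : Int),
      (∀ r ∈ l, 0 ≤ r ∧ r < (N:Int)) → pvSized K sA →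
      pvGoodFrom K 0 (fun k => seen.getD k false) sA → seen.length = N →
      (l.foldl (pvAStepV (2^K)) (sA, tot)).2 = (l.foldl pvBStepV (seen, tot)).2 := by
  intro l
  induction l with
  | nil => intro sA seen tot _ _ _ _; rfl
  | cons r t ih =>
    intro sA seen tot hb hS hG hlen
    obtain ⟨hr0, hrN⟩ := hb r (by simp)
    have hpN : r.toNat < N := by omega
    have hpK : r.toNat < 2^K := by omega
    have hirang : 2^K + r.toNat - 1 + 1 = 2^K + r.toNat := by
      have := Nat.two_pow_pos K
      omega
    obtain ⟨hG', hS'⟩ := pvUpdate_correct K (fun k => seen.getD k false) sA r.toNat hpK hS hG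
    rw [List.foldl_cons, List.foldl_cons]
    have hA : pvAStepV (2^K) (sA, tot) r
        = (pvUpdLoop (sA.1, sA.2.1.set (2^K + r.toNat) 0, sA.2.2.1.set (2^K + r.toNat) 1, sA.2.2.2)
            ((2^K + r.toNat)/2),
           if r > 0 then
             pvReduceA (tot + (pvQueryLoop sA (pvQStep sA (pvNode sA (2^K + r.toNat - 1))
                 (2^K + r.toNat - 1)) ((2^K + r.toNat - 1)/2)).1
               + (pvQueryLoop sA (pvQStep sA (pvNode sA (2^K + r.toNat - 1))
                 (2^K + r.toNat - 1)) ((2^K + r.toNat - 1)/2)).2.1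
               + (pvQueryLoop sA (pvQStep sA (pvNode sA (2^K + r.toNat - 1))
                 (2^K + r.toNat - 1)) ((2^K + r.toNat - 1)/2)).2.2.1
               + (pvQueryLoop sA (pvQStep sA (pvNode sA (2^K + r.toNat - 1))
                 (2^K + r.toNat - 1)) ((2^K + r.toNat - 1)/2)).2.2.2 - 1)
           else tot) := by
      simp only [pvAStepV]
      rw [hirang]
    have hB : pvBStepV (seen, tot) r
        = (seen.set r.toNat true,
           if r > 0 then
             pvReduceB (tot + (pvRed (pvProd (fun k => seen.getD k false) 0 r.toNat)).1
               + (pvRed (pvProd (fun k => seen.getD k false) 0 r.toNat)).2.1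
               + (pvRed (pvProd (fun k => seen.getD k false) 0 r.toNat)).2.2.1
               + (pvRed (pvProd (fun k => seen.getD k false) 0 r.toNat)).2.2.2 - 1)
           else tot) := by
      simp only [pvBStepV]
      rw [pvBInner seen r.toNat]
    rw [hA, hB]
    have htot : (if r > 0 then
             pvReduceA (tot + (pvQueryLoop sA (pvQStep sA (pvNode sA (2^K + r.toNat - 1))
                 (2^K + r.toNat - 1)) ((2^K + r.toNat - 1)/2)).1
               + (pvQueryLoop sA (pvQStep sA (pvNode sA (2^K + r.toNat - 1))
                 (2^K + r.toNat - 1)) ((2^K + r.toNat - 1)/2)).2.1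
               + (pvQueryLoop sA (pvQStep sA (pvNode sA (2^K + r.toNat - 1))
                 (2^K + r.toNat - 1)) ((2^K + r.toNat - 1)/2)).2.2.1
               + (pvQueryLoop sA (pvQStep sA (pvNode sA (2^K + r.toNat - 1))
                 (2^K + r.toNat - 1)) ((2^K + r.toNat - 1)/2)).2.2.2 - 1)
           else tot)
        = (if r > 0 then
             pvReduceB (tot + (pvRed (pvProd (fun k => seen.getD k false) 0 r.toNat)).1
               + (pvRed (pvProd (fun k => seen.getD k false) 0 r.toNat)).2.1
               + (pvRed (pvProd (fun k => seen.getD k false) 0 r.toNat)).2.2.1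
               + (pvRed (pvProd (fun k => seen.getD k false) 0 r.toNat)).2.2.2 - 1)
           else tot) := by
      by_cases hr : r > 0
      · rw [if_pos hr, if_pos hr]
        have hp1 : 1 ≤ r.toNat := by omega
        have hKpos : 1 ≤ K := by
          by_contra hc
          have hK0 : K = 0 := by omega
          rw [hK0] at hpK
          norm_num at hpK
          omega
        obtain ⟨M, rfl⟩ : ∃ M, K = M + 1 := ⟨K - 1, by omega⟩
        rw [pvQuery_correct M (fun k => seen.getD k false) sA hG r.toNat hp1 (by omega)]
        rw [pvReduceAB]
      · rw [if_neg hr, if_neg hr]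
    rw [htot]
    apply ih
    · exact fun x hx => hb x (by simp [hx])
    · exact hS'
    · rw [pvSeen_set seen r.toNat (by omega)]
      exact hG'
    · rw [List.length_set, hlen]

-- ===== VERDICT (by name: the statement is the Claim_ definition above) =====
theorem zigZagEscape_spec : Claim_equal_zigZagEscape := by
  intro H _hDom hPre
  unfold Spec_zigZagEscape
  rw [zigZagEscape_eq, zigZagEscape_alt_eq,
    pvFoldl_getD_range' (pvRankT H) H.length (pvRankT_length H).symm 0
      (pvAStepV (pvHs H.length)) (pvTree0 (pvHs H.length), 1)]
  obtain ⟨K, hK1, hK2⟩ := pvHs_spec H.length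
  rw [hK1]
  obtain ⟨hGood0, hSized0⟩ := pvTree0_correct K
  apply pvMain_fold K H.length hK2 (pvRankT H) (pvTree0 (2^K)) (List.replicate H.length false) 1
  · intro r hr
    obtain ⟨k, hk, hkr⟩ := List.mem_iff_getElem.mp hr
    have hkH : k < H.length := by rwa [pvRankT_length] at hk
    have hgd : (pvRankT H).getD k 0 = r := by
      rw [List.getD, List.getElem?_eq_getElem hk]
      simpa using hkr
    rw [← hgd]
    exact pvRankT_bounds H hPre k hkH
  · exact hSized0
  · rw [pvReplicate_false]
    exact hGood0
  · simp
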